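-- pv_equiv track=rewrite | github.com/manjutrytest/aws-bom-infrastructure | scripts/simple-bom-parser.py | create_compute_parameters
-- ===== SOURCE A (Python) =====
-- def create_compute_parameters(resources, environment):
--     """Create compute stack parameters"""
--     params = [
--         {"ParameterKey": "Environment", "ParameterValue": environment},
--         {"ParameterKey": "NetworkStackName", "ParameterValue": "network-stack"},
--         {"ParameterKey": "CreateInstance1", "ParameterValue": "false"},
--         {"ParameterKey": "CreateInstance2", "ParameterValue": "false"},
--         {"ParameterKey": "InstanceType1", "ParameterValue": "t3.medium"},
--         {"ParameterKey": "InstanceType2", "ParameterValue": "t3.medium"},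
--         {"ParameterKey": "VolumeSize1", "ParameterValue": "40"},
--         {"ParameterKey": "VolumeSize2", "ParameterValue": "40"},
--         {"ParameterKey": "KeyPairName", "ParameterValue": ""}
--     ]
--
--     # Check for EC2 instances in BOM
--     ec2_count = 0
--     for resource in resources:
--         if resource['resource_type'] == 'ec2':
--             ec2_count += 1
--             instance_type = resource.get('instance_type', 't3.medium')
--             storage_size = resource.get('storage_size', '40')
--
--             if ec2_count == 1:
--                 params[2]["ParameterValue"] = "true"  # CreateInstance1
--                 params[4]["ParameterValue"] = instance_type  # InstanceType1
--                 params[6]["ParameterValue"] = storage_size  # VolumeSize1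
--             elif ec2_count == 2:
--                 params[3]["ParameterValue"] = "true"  # CreateInstance2
--                 params[5]["ParameterValue"] = instance_type  # InstanceType2
--                 params[7]["ParameterValue"] = storage_size  # VolumeSize2
--
--     return params
-- ===== SOURCE B (Python) =====
-- def create_compute_parameters(resources, environment):
--     """Create compute stack parameters"""
--     ec2 = [r for r in resources if r['resource_type'] == 'ec2']
--
--     def ec2_param(i, key, default):
--         return ec2[i].get(key, default) if len(ec2) > i else default
--
--     return [
--         {"ParameterKey": "Environment", "ParameterValue": environment},
--         {"ParameterKey": "NetworkStackName", "ParameterValue": "network-stack"},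
--         {"ParameterKey": "CreateInstance1", "ParameterValue": "true" if len(ec2) >= 1 else "false"},
--         {"ParameterKey": "CreateInstance2", "ParameterValue": "true" if len(ec2) >= 2 else "false"},
--         {"ParameterKey": "InstanceType1", "ParameterValue": ec2_param(0, "instance_type", "t3.medium")},
--         {"ParameterKey": "InstanceType2", "ParameterValue": ec2_param(1, "instance_type", "t3.medium")},
--         {"ParameterKey": "VolumeSize1", "ParameterValue": ec2_param(0, "storage_size", "40")},
--         {"ParameterKey": "VolumeSize2", "ParameterValue": ec2_param(1, "storage_size", "40")},
--         {"ParameterKey": "KeyPairName", "ParameterValue": ""},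
--     ]
-- ===== Notes on version B (the rewrite author's own statement) =====
-- stated objective: simpler
-- what changed: Instead of building a mutable template and patching rows 2..7 by index inside a counting loop, B first filters the ec2 resources and then constructs the final parameter list directly in one literal, deriving the six ec2-dependent values from the first two filtered entries (or the defaults).
import Mathlib
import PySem

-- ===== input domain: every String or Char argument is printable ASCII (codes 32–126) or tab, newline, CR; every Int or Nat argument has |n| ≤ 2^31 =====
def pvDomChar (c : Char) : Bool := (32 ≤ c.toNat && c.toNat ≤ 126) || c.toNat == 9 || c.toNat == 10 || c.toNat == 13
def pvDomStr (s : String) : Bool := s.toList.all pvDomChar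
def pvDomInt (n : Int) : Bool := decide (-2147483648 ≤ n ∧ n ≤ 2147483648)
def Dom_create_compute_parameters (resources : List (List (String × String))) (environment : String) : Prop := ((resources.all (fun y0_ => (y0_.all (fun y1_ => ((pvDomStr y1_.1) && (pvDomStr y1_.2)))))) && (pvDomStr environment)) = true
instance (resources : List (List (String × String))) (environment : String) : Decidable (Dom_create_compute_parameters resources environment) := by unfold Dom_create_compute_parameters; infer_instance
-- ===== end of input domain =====

-- B replaces A's index-patched mutable template and counting loop by filtering the ec2
-- resources once and building the parameter list directly in one literal (objective: simpler).


-- ===== PORT A =====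
-- params[i]["ParameterValue"] = v  : overwrite in the i-th dict, in place
def ccpUpd (params : List (List (String × String))) (i : Nat) (v : String) : List (List (String × String)) :=
  params.set i ((PySem.Dict.mk (params.getD i [])).insert "ParameterValue" v).items

def ccpStep (st : List (List (String × String)) × Int) (r : List (String × String)) :
    List (List (String × String)) × Int :=
  if (PySem.Dict.mk r).get? "resource_type" == some "ec2" then
    let c := st.2 + 1
    let instance_type := (PySem.Dict.mk r).getD "instance_type" "t3.medium"
    let storage_size := (PySem.Dict.mk r).getD "storage_size" "40"
    if c == 1 then
      (ccpUpd (ccpUpd (ccpUpd st.1 2 "true") 4 instance_type) 6 storage_size, c)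
    else if c == 2 then
      (ccpUpd (ccpUpd (ccpUpd st.1 3 "true") 5 instance_type) 7 storage_size, c)
    else (st.1, c)
  else st

def create_compute_parameters (resources : List (List (String × String))) (environment : String) : List (List (String × String)) :=
  let params : List (List (String × String)) :=
    [ [("ParameterKey", "Environment"), ("ParameterValue", environment)],
      [("ParameterKey", "NetworkStackName"), ("ParameterValue", "network-stack")],
      [("ParameterKey", "CreateInstance1"), ("ParameterValue", "false")],
      [("ParameterKey", "CreateInstance2"), ("ParameterValue", "false")],
      [("ParameterKey", "InstanceType1"), ("ParameterValue", "t3.medium")],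
      [("ParameterKey", "InstanceType2"), ("ParameterValue", "t3.medium")],
      [("ParameterKey", "VolumeSize1"), ("ParameterValue", "40")],
      [("ParameterKey", "VolumeSize2"), ("ParameterValue", "40")],
      [("ParameterKey", "KeyPairName"), ("ParameterValue", "")] ]
  (resources.foldl ccpStep (params, 0)).1

-- ===== PORT B =====
-- ec2_param(i, key, default) of Source B
def ccpParam (ec2 : List (List (String × String))) (i : Nat) (key : String) (dflt : String) : String :=
  if i < ec2.length then (PySem.Dict.mk (ec2.getD i [])).getD key dflt else dflt

def create_compute_parameters_alt (resources : List (List (String × String))) (environment : String) : List (List (String × String)) :=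
  let ec2 := resources.filter (fun r => (PySem.Dict.mk r).get? "resource_type" == some "ec2")
  [ [("ParameterKey", "Environment"), ("ParameterValue", environment)],
    [("ParameterKey", "NetworkStackName"), ("ParameterValue", "network-stack")],
    [("ParameterKey", "CreateInstance1"), ("ParameterValue", if 1 ≤ ec2.length then "true" else "false")],
    [("ParameterKey", "CreateInstance2"), ("ParameterValue", if 2 ≤ ec2.length then "true" else "false")],
    [("ParameterKey", "InstanceType1"), ("ParameterValue", ccpParam ec2 0 "instance_type" "t3.medium")],
    [("ParameterKey", "InstanceType2"), ("ParameterValue", ccpParam ec2 1 "instance_type" "t3.medium")],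
    [("ParameterKey", "VolumeSize1"), ("ParameterValue", ccpParam ec2 0 "storage_size" "40")],
    [("ParameterKey", "VolumeSize2"), ("ParameterValue", ccpParam ec2 1 "storage_size" "40")],
    [("ParameterKey", "KeyPairName"), ("ParameterValue", "")] ]

-- ===== PRECONDITION & SPEC =====
-- Pre_ excludes resources without a 'resource_type' key, on which Python A (and B) raise KeyError.
def Pre_create_compute_parameters (resources : List (List (String × String))) (environment : String) : Prop :=
  ∀ r ∈ resources, ((PySem.Dict.mk r).get? "resource_type").isSome

instance (resources : List (List (String × String))) (environment : String) : Decidable (Pre_create_compute_parameters resources environment) := by unfold Pre_create_compute_parameters; infer_instance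

def pvWitness_create_compute_parameters : (List (List (String × String))) × String :=
  ([[("resource_type", "ec2"), ("instance_type", "m5.large")], [("resource_type", "s3")]], "dev")

def Spec_create_compute_parameters (resources : List (List (String × String))) (environment : String) (out : List (List (String × String))) : Prop := out = create_compute_parameters_alt resources environment
instance (resources : List (List (String × String))) (environment : String) (out : List (List (String × String))) : Decidable (Spec_create_compute_parameters resources environment out) := by unfold Spec_create_compute_parameters; infer_instance

-- ===== CLAIM (what is proved, stated in full; the proofs are below) =====
def Claim_equal_create_compute_parameters : Prop := ∀ (resources : List (List (String × String))) (environment : String), Dom_create_compute_parameters resources environment → Pre_create_compute_parameters resources environment → Spec_create_compute_parameters resources environment (create_compute_parameters resources environment)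

-- ===== LEMMAS AND PROOFS =====

-- once the counter is ≥ 2, A's loop never touches params again
theorem ccp_loop_ge_two (rs : List (List (String × String)))
    (params : List (List (String × String))) (c : Int) (hc : 2 ≤ c) :
    (rs.foldl ccpStep (params, c)).1 = params := by
  induction rs generalizing c with
  | nil => rfl
  | cons r rs ih =>
    simp only [List.foldl_cons, ccpStep]
    split
    · have h1 : (c + 1 == (1 : Int)) = false := by simp; omega
      have h2 : (c + 1 == (2 : Int)) = false := by simp; omega
      simp only [h1, h2]
      exact ih (c + 1) (by omega)
    · exact ih c hc

-- with the counter at 1, A's loop applies the slot-2 update to the first filtered ec2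
theorem ccp_loop_one (rs : List (List (String × String)))
    (params : List (List (String × String))) :
    (rs.foldl ccpStep (params, 1)).1 =
      match rs.filter (fun r => (PySem.Dict.mk r).get? "resource_type" == some "ec2") with
      | [] => params
      | r :: _ =>
        ccpUpd (ccpUpd (ccpUpd params 3 "true")
          5 ((PySem.Dict.mk r).getD "instance_type" "t3.medium"))
          7 ((PySem.Dict.mk r).getD "storage_size" "40") := by
  induction rs generalizing params with
  | nil => rfl
  | cons r rs ih =>
    simp only [List.foldl_cons, ccpStep, List.filter_cons]
    by_cases h : ((PySem.Dict.mk r).get? "resource_type" == some "ec2") = true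
    · simp only [h, if_true, show ((1 : Int) + 1 == 1) = false by decide,
        show ((1 : Int) + 1 == 2) = true by decide]
      exact ccp_loop_ge_two rs _ 2 (by omega)
    · simp only [h, if_false, Bool.false_eq_true]
      exact ih params

-- full characterisation of A's loop from counter 0 in terms of the filtered ec2 list
theorem ccp_loop_zero (rs : List (List (String × String)))
    (params : List (List (String × String))) :
    (rs.foldl ccpStep (params, 0)).1 =
      match rs.filter (fun r => (PySem.Dict.mk r).get? "resource_type" == some "ec2") with
      | [] => params
      | r1 :: rest =>
        let p1 := ccpUpd (ccpUpd (ccpUpd params 2 "true")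
          4 ((PySem.Dict.mk r1).getD "instance_type" "t3.medium"))
          6 ((PySem.Dict.mk r1).getD "storage_size" "40")
        match rest with
        | [] => p1
        | r2 :: _ =>
          ccpUpd (ccpUpd (ccpUpd p1 3 "true")
            5 ((PySem.Dict.mk r2).getD "instance_type" "t3.medium"))
            7 ((PySem.Dict.mk r2).getD "storage_size" "40") := by
  induction rs generalizing params with
  | nil => rfl
  | cons r rs ih =>
    simp only [List.foldl_cons, ccpStep, List.filter_cons]
    by_cases h : ((PySem.Dict.mk r).get? "resource_type" == some "ec2") = true
    · simp only [h, if_true, show ((0 : Int) + 1 == 1) = true by decide]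
      exact ccp_loop_one rs _
    · simp only [h, if_false, Bool.false_eq_true]
      exact ih params

-- ===== VERDICT (by name: the statement is the Claim_ definition above) =====
theorem create_compute_parameters_spec : Claim_equal_create_compute_parameters := by
  intro resources environment _ _
  unfold Spec_create_compute_parameters create_compute_parameters create_compute_parameters_alt
  rw [ccp_loop_zero]
  cases h : resources.filter (fun r => (PySem.Dict.mk r).get? "resource_type" == some "ec2") with
  | nil => simp [ccpParam]
  | cons r1 rest =>
    cases rest with
    | nil => simp [ccpParam, ccpUpd, PySem.Dict.insert, PySem.Dict.contains]
    | cons r2 rest2 => simp [ccpParam, ccpUpd, PySem.Dict.insert, PySem.Dict.contains]
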